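-- pv_equiv track=rewrite | github.com/ato/jvmctl-old | jvmctl/config.py | preprocess_indent
-- ===== SOURCE A (Python) =====
-- def preprocess_indent(fp):
--     "Indent lines within a shell-style array"
--     paren_depth = 0
--     legacy = True
--     for line in fp:
--         if line.strip() == '[jvmctl]':
--             legacy = False
--         if legacy:
--             if paren_depth > 0 and line[0] not in [' ', '\t']:
--                 line = '  ' + line
--             paren_depth += line.count('(') - line.count(')')
--         yield line
-- ===== SOURCE B (Python) =====
-- def preprocess_indent(fp):
--     "Indent lines within a shell-style array"
--     # Materialize the legacy prefix (lines before the '[jvmctl]' sentinel) and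
--     # compute, as a prefix-sum table, the paren depth *before* each of its lines.
--     # Indenting with '  ' never changes a line's paren counts, so the depths can
--     # be computed from the original lines up front, independent of the rewriting.
--     lines = list(fp)
--     k = len(lines)
--     for i, line in enumerate(lines):
--         if line.strip() == '[jvmctl]':
--             k = i
--             break
--     depths = []
--     d = 0
--     for line in lines[:k]:
--         depths.append(d)
--         d += line.count('(') - line.count(')')
--     for i in range(k):
--         line = lines[i]
--         if depths[i] > 0 and line[0] not in ' \t':
--             line = '  ' + line
--         yield line
--     for line in lines[k:]:
--         yield line
-- ===== Notes on version B (the rewrite author's own statement) =====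
-- stated objective: alternative
-- what changed: A streams once with mutable paren_depth/legacy state per line; B first locates the '[jvmctl]' sentinel index, precomputes a prefix-sum table of paren depths over the original prefix lines (valid because the two-space indent contains no parens), then maps the indent over the prefix by table lookup and appends the suffix verbatim.
import Mathlib
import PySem

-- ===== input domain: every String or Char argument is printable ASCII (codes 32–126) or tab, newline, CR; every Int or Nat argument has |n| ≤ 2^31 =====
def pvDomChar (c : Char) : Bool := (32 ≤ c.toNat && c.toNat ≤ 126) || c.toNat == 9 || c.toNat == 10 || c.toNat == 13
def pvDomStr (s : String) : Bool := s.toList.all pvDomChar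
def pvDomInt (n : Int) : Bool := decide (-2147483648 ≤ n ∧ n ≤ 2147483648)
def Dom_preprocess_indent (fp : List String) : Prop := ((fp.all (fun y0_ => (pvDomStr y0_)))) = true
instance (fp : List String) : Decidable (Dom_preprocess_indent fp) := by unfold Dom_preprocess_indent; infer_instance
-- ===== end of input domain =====

-- B replaces A's one streaming pass with mutable paren_depth/legacy state by: locate the
-- '[jvmctl]' sentinel index, precompute a prefix-sum table of paren depths over the original
-- prefix lines (the two-space indent contains no parens, so depths are indent-independent),
-- then indent the prefix by table lookup and append the suffix verbatim (objective: alternative).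
-- Return-value equivalence only: A is a lazy generator, B materializes its input list first.

-- ===== PORT A =====
-- one iteration of A's for-loop; state = (paren_depth, legacy, lines yielded so far)
def pvStepA (st : Int × Bool × List String) (line : String) : Int × Bool × List String :=
  let legacy := if PySem.Str.strip line == "[jvmctl]" then false else st.2.1
  if legacy then
    let line' := if st.1 > 0 && !(PySem.Str.pyGet? line 0 == some ' ' || PySem.Str.pyGet? line 0 == some '\t')
                 then "  " ++ line else line
    (st.1 + (PySem.Str.count line' "(" : Int) - (PySem.Str.count line' ")" : Int), legacy, st.2.2 ++ [line'])
  else (st.1, legacy, st.2.2 ++ [line])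

def preprocess_indent (fp : List String) : List String :=
  (fp.foldl pvStepA (0, true, [])).2.2

-- ===== PORT B =====
-- Source B's first loop: index of the first '[jvmctl]' sentinel line (length if absent)
def pvFindK : List String → Nat
  | [] => 0
  | line :: rest => if PySem.Str.strip line == "[jvmctl]" then 0 else pvFindK rest + 1

-- Source B's second loop: the paren depth BEFORE each prefix line, as a prefix-sum table
def pvDepths (d : Int) : List String → List Int
  | [] => []
  | line :: rest =>
      d :: pvDepths (d + (PySem.Str.count line "(" : Int) - (PySem.Str.count line ")" : Int)) rest

-- body of Source B's third loop: indent line i given its tabulated depth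
def pvIndent (d : Int) (line : String) : String :=
  if d > 0 && !(PySem.Str.pyGet? line 0 == some ' ' || PySem.Str.pyGet? line 0 == some '\t')
  then "  " ++ line else line

def preprocess_indent_alt (fp : List String) : List String :=
  let k := pvFindK fp
  List.zipWith pvIndent (pvDepths 0 (fp.take k)) (fp.take k) ++ fp.drop k

-- ===== PRECONDITION & SPEC =====
-- Pre_ excludes exactly the inputs where Python A raises IndexError ('line[0]' on an empty
-- line while paren_depth > 0 before the '[jvmctl]' sentinel); B raises there too.
def Pre_preprocess_indent (fp : List String) : Prop :=
  ∀ i < fp.length, fp.getD i "" = "" →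
    (∃ j < i, PySem.Str.strip (fp.getD j "") = "[jvmctl]") ∨
    (((fp.take i).map (fun s => (PySem.Str.count s "(" : Int) - (PySem.Str.count s ")" : Int))).sum ≤ 0)
instance (fp : List String) : Decidable (Pre_preprocess_indent fp) := by unfold Pre_preprocess_indent; infer_instance

def pvWitness_preprocess_indent : List String := ["FOO=(", "bar", ")", "[jvmctl]", "rest"]

def Spec_preprocess_indent (fp : List String) (out : List String) : Prop := out = preprocess_indent_alt fp
instance (fp : List String) (out : List String) : Decidable (Spec_preprocess_indent fp out) := by unfold Spec_preprocess_indent; infer_instance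

-- ===== CLAIM (what is proved, stated in full; the proofs are below) =====
def Claim_equal_preprocess_indent : Prop := ∀ (fp : List String), Dom_preprocess_indent fp → Pre_preprocess_indent fp → Spec_preprocess_indent fp (preprocess_indent fp)

-- ===== LEMMAS AND PROOFS =====

-- counting a single character via Python's substring counter is List.count
theorem pvCountGoSingleton (c : Char) (l : List Char) (fuel acc : Nat) (h : l.length ≤ fuel) :
    PySem.Chars.count.go [c] fuel l acc = acc + l.count c := by
  induction fuel generalizing l acc with
  | zero => cases l with
    | nil => simp [PySem.Chars.count.go]
    | cons x t => simp at h
  | succ fuel ih =>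
    cases l with
    | nil => simp [PySem.Chars.count.go]
    | cons x t =>
      simp only [PySem.Chars.count.go, List.isPrefixOf]
      by_cases hc : c = x
      · subst hc
        simp only [beq_self_eq_true, Bool.true_and, if_true, List.length, List.drop_succ_cons,
          List.drop_zero]
        rw [ih t (acc + 1) (by simp at h; omega)]
        simp [List.count_cons]
        omega
      · have hb : (c == x) = false := by simp [hc]
        simp only [hb, Bool.false_and, if_false]
        rw [ih t acc (by simp at h; omega)]
        simp [Ne.symm hc]

theorem pvCountSingle (s : String) (c : Char) (hc : String.mk [c] ≠ "") :
    PySem.Str.count s (String.mk [c]) = s.toList.count c := by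
  simp only [PySem.Str.count_eq, PySem.Chars.count]
  rw [if_neg (by simpa using hc)]
  rw [show (String.mk [c]).toList = [c] from Eq.symm ((fun {l} {s} => String.ofList_eq.mp) rfl)]
  rw [pvCountGoSingleton c s.toList s.toList.length 0 (le_refl _)]
  simp

-- prepending the two-space indent changes neither paren count
theorem pvCountIndentOpen (d : Int) (line : String) :
    PySem.Str.count (pvIndent d line) "(" = PySem.Str.count line "(" := by
  unfold pvIndent
  split_ifs with h
  · rw [show ("(" : String) = String.mk ['('] from rfl,
      pvCountSingle _ _ (by decide), pvCountSingle _ _ (by decide)]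
    rw [show (("  " : String) ++ line).toList = ' ' :: ' ' :: line.toList from by simp]
    simp
  · rfl

theorem pvCountIndentClose (d : Int) (line : String) :
    PySem.Str.count (pvIndent d line) ")" = PySem.Str.count line ")" := by
  unfold pvIndent
  split_ifs with h
  · rw [show (")" : String) = String.mk [')'] from rfl,
      pvCountSingle _ _ (by decide), pvCountSingle _ _ (by decide)]
    rw [show (("  " : String) ++ line).toList = ' ' :: ' ' :: line.toList from by simp]
    simp
  · rfl

-- once legacy is False, A's loop only appends the remaining lines unchanged
theorem pvFoldA_false (l : List String) (d : Int) (acc : List String) :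
    (l.foldl pvStepA (d, false, acc)).2.2 = acc ++ l := by
  induction l generalizing d acc with
  | nil => simp
  | cons x l ih =>
    simp only [List.foldl_cons, pvStepA, ite_self, Bool.false_eq_true, if_false]
    rw [ih]
    simp

-- while legacy is True, A's fold accumulates exactly B's table-driven prefix plus the suffix
theorem pvFoldA_true (l : List String) (d : Int) (acc : List String) :
    (l.foldl pvStepA (d, true, acc)).2.2 =
      acc ++ (List.zipWith pvIndent (pvDepths d (l.take (pvFindK l))) (l.take (pvFindK l))
              ++ l.drop (pvFindK l)) := by
  induction l generalizing d acc with
  | nil => simp [pvFindK, pvDepths]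
  | cons x l ih =>
    by_cases h : (PySem.Str.strip x == "[jvmctl]") = true
    · simp only [List.foldl_cons, pvStepA, h, if_true, Bool.false_eq_true, if_false,
        pvFindK, List.take_zero, List.drop_zero, pvDepths, List.zipWith_nil_left, List.nil_append]
      rw [pvFoldA_false]
      simp
    · simp only [List.foldl_cons, pvStepA, h, Bool.false_eq_true, if_false, if_true, pvFindK,
        List.take_succ_cons, List.drop_succ_cons, pvDepths, List.zipWith_cons_cons]
      -- the line A yields is B's table-driven pvIndent, with unchanged paren counts
      rw [show (if d > 0 && !(PySem.Str.pyGet? x 0 == some ' ' || PySem.Str.pyGet? x 0 == some '\t')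
                then "  " ++ x else x) = pvIndent d x from rfl]
      rw [pvCountIndentOpen, pvCountIndentClose, ih]
      simp

-- ===== VERDICT (by name: the statement is the Claim_ definition above) =====
theorem preprocess_indent_spec : Claim_equal_preprocess_indent := by
  intro fp _ _
  unfold Spec_preprocess_indent preprocess_indent preprocess_indent_alt
  rw [pvFoldA_true]
  simp
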